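-- pv_equiv track=rewrite | github.com/vpabba03/Grouper_Moon_Detection | original_model/FishFaceProcessing/Tensorflow/simple-object-tracking/visualize_tracking.py | make_to_write
-- ===== SOURCE A (Python) =====
-- def make_to_write(has_detects, buffer = 13): #buffer is a little over 3 seconds long in both directions, left and right
--     #to_write is a list that says to save the frame or not
--     #should save the frame if it's got a detection,
--     #OR if buffer frames ahead and behind has detections
--     to_write = [
--     True if (
--         (has_detects[i] is True) or
--         any(
--             has_detects[max(0,(i - buffer)):min(len(has_detects),i + buffer)]
--             )
--         )
--     else False
--     for i in range(len(has_detects))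
--     ]
--     return(to_write)
-- ===== SOURCE B (Python) =====
-- def make_to_write(has_detects, buffer = 13):
--     # One pass building a prefix-sum of detection counts, then O(1) window query per frame.
--     n = len(has_detects)
--     prefix = [0]
--     c = 0
--     for v in has_detects:
--         if v is True:
--             c += 1
--         prefix.append(c)
--     out = []
--     for i in range(n):
--         lo = max(0, i - buffer)
--         hi = min(n, i + buffer)
--         out.append(has_detects[i] is True or (lo < hi and prefix[hi] > prefix[lo]))
--     return out
-- ===== Notes on version B (the rewrite author's own statement) =====
-- stated objective: faster
-- what changed: Replaced the per-index any() over a re-sliced buffer window (O(n*buffer)) by a single prefix-sum of detection counts with an O(1) clamped-window query per frame.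
-- intended difference: For negative buffer, A's slice stop min(len,i+buffer) goes negative for i < -buffer and Python wraps it to the end of the list, so A marks such frames True from detections in an accidental wrap-around window [i-buffer, n+i+buffer); B treats a negative buffer as an empty window and returns has_detects[i] itself, the intended value. — e.g. on make_to_write([false, true, false], -1): A returns [true, true, false], B returns [false, true, false]
import Mathlib
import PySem

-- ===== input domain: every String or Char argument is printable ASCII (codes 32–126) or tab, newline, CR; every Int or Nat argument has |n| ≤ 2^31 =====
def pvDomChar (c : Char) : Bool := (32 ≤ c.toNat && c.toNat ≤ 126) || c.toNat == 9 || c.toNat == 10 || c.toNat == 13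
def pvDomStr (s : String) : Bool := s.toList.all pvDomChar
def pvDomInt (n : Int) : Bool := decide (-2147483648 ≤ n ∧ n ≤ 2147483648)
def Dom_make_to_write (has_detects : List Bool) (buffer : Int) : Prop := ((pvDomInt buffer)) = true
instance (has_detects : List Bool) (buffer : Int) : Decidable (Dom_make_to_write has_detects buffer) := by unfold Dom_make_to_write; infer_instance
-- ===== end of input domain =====

-- B replaces A's per-frame any() over a fresh slice by one prefix-sum pass and an O(1)
-- clamped window query per frame (A: O(n*buffer), B: O(n)); on negative buffer B uses the
-- intended empty window instead of A's wrapped slice (see D_ below).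

-- ===== PORT A =====
def make_to_write (has_detects : List Bool) (buffer : Int) : List Bool :=
  (List.range has_detects.length).map (fun (i : Nat) =>
    if (PySem.List.pyGet? has_detects (i : Int) == some true)
        || (PySem.List.slice has_detects
              (some (max 0 ((i : Int) - buffer)))
              (some (min ((has_detects.length : Int)) ((i : Int) + buffer)))).any (fun b => b)
    then true else false)

-- ===== PORT B =====
def make_to_write_alt (has_detects : List Bool) (buffer : Int) : List Bool :=
  let pfx : List Int := (has_detects.foldl (fun (st : List Int × Int) v =>
      let c := if v == true then st.2 + 1 else st.2
      (st.1 ++ [c], c)) ([0], 0)).1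
  (List.range has_detects.length).map (fun (i : Nat) =>
    let lo : Int := max 0 ((i : Int) - buffer)
    let hi : Int := min ((has_detects.length : Int)) ((i : Int) + buffer)
    (PySem.List.pyGet? has_detects (i : Int) == some true)
      || (decide (lo < hi) &&
          decide (((PySem.List.pyGet? pfx hi).getD 0) > ((PySem.List.pyGet? pfx lo).getD 0))))

-- ===== PRECONDITION & SPEC =====
-- For negative buffer, A's slice stop min(len,i+buffer) is negative for i < -buffer and Python
-- wraps it to the end of the list, so A marks such frames from detections in an accidental
-- wrap-around window [i-buffer, n+i+buffer); B uses the intended empty window there.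
def D_make_to_write (has_detects : List Bool) (buffer : Int) : Prop :=
  buffer < 0 ∧ ∃ i < has_detects.length ⊓ buffer.natAbs, !has_detects[i]! ∧
    true ∈ (has_detects.drop (i + buffer.natAbs)).take (has_detects.length - 2 * buffer.natAbs)
instance (has_detects : List Bool) (buffer : Int) : Decidable (D_make_to_write has_detects buffer) := by
  unfold D_make_to_write; infer_instance

def Spec_make_to_write (has_detects : List Bool) (buffer : Int) (out : List Bool) : Prop :=
  ¬ D_make_to_write has_detects buffer → out = make_to_write_alt has_detects buffer
instance (has_detects : List Bool) (buffer : Int) (out : List Bool) : Decidable (Spec_make_to_write has_detects buffer out) := by unfold Spec_make_to_write; infer_instance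

def pvDiffWitness_make_to_write : List Bool × Int := ([false, true, false], -1)
def pvDiffWitnessOut_make_to_write : (List Bool) × (List Bool) :=
  ([true, true, false], [false, true, false])

-- ===== CLAIM (what is proved, stated in full; the proofs are below) =====
def Claim_unchanged_make_to_write : Prop := ∀ (has_detects : List Bool) (buffer : Int), Dom_make_to_write has_detects buffer → Spec_make_to_write has_detects buffer (make_to_write has_detects buffer)
def Claim_changed_make_to_write : Prop := Dom_make_to_write (pvDiffWitness_make_to_write.1) (pvDiffWitness_make_to_write.2) ∧ D_make_to_write (pvDiffWitness_make_to_write.1) (pvDiffWitness_make_to_write.2) ∧ make_to_write (pvDiffWitness_make_to_write.1) (pvDiffWitness_make_to_write.2) = pvDiffWitnessOut_make_to_write.1 ∧ make_to_write_alt (pvDiffWitness_make_to_write.1) (pvDiffWitness_make_to_write.2) = pvDiffWitnessOut_make_to_write.2 ∧ pvDiffWitnessOut_make_to_write.1 ≠ pvDiffWitnessOut_make_to_write.2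
def Claim_exact_make_to_write : Prop := ∀ (has_detects : List Bool) (buffer : Int), Dom_make_to_write has_detects buffer → D_make_to_write has_detects buffer → make_to_write has_detects buffer ≠ make_to_write_alt has_detects buffer

-- ===== LEMMAS AND PROOFS =====

-- the prefix list built by B's first loop is the list of detection counts of the prefixes
theorem pfx_aux (hd : List Bool) (acc : List Int) (c : Int) :
    (hd.foldl (fun (st : List Int × Int) v =>
      let c := if v == true then st.2 + 1 else st.2
      (st.1 ++ [c], c)) (acc, c)).1
    = acc ++ (List.range hd.length).map (fun k => c + ((hd.take (k+1)).count true : Int)) := by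
  induction hd generalizing acc c with
  | nil => simp
  | cons v t ih =>
    simp only [List.foldl_cons, List.length_cons, List.range_succ_eq_map, List.map_cons,
      List.map_map]
    rw [ih]
    cases v <;>
      simp [List.take_succ_cons, List.count_cons, List.append_assoc] <;>
      (intro k _; ring)

theorem pfx_spec (hd : List Bool) :
    (hd.foldl (fun (st : List Int × Int) v =>
      let c := if v == true then st.2 + 1 else st.2
      (st.1 ++ [c], c)) (([0], 0) : List Int × Int)).1
    = (List.range (hd.length + 1)).map (fun k => ((hd.take k).count true : Int)) := by
  rw [pfx_aux, List.range_succ_eq_map]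
  simp

theorem pfx_get (hd : List Bool) (k : Int) (h0 : 0 ≤ k) (h1 : k ≤ (hd.length : Int)) :
    (PySem.List.pyGet? ((List.range (hd.length + 1)).map (fun k => ((hd.take k).count true : Int))) k).getD 0
    = ((hd.take k.toNat).count true : Int) := by
  rw [← Int.toNat_of_nonneg h0, PySem.List.pyGet?_natCast]
  have hk : k.toNat < hd.length + 1 := by omega
  simp [hk]
  congr 2
  omega

theorem window_any (hd : List Bool) (a m : Nat) :
    ((hd.drop a).take m).any (fun b => b) = true ↔
      ∃ j, a ≤ j ∧ j < a + m ∧ j < hd.length ∧ hd[j]! = true := by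
  rw [List.any_eq_true]
  constructor
  · rintro ⟨x, hx, hxv⟩
    rw [List.mem_iff_getElem] at hx
    obtain ⟨k, hk, hkx⟩ := hx
    have hlen : k < m ∧ k < hd.length - a := by
      simpa [List.length_take, List.length_drop] using hk
    refine ⟨a + k, by omega, by omega, by omega, ?_⟩
    rw [getElem!_pos _ _ (by omega)]
    rw [List.getElem_take, List.getElem_drop] at hkx
    simp only [hxv] at hkx
    exact hkx
  · rintro ⟨j, h1, h2, h3, h4⟩
    refine ⟨true, ?_, rfl⟩
    rw [List.mem_iff_getElem]
    refine ⟨j - a, by simp [List.length_take, List.length_drop]; omega, ?_⟩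
    rw [List.getElem_take, List.getElem_drop]
    rw [getElem!_pos _ _ (by omega)] at h4
    exact (getElem_congr rfl (by omega) (by omega)).trans h4

theorem mem_window (hd : List Bool) (a m : Nat) :
    true ∈ (hd.drop a).take m ↔
      ∃ j, a ≤ j ∧ j < a + m ∧ j < hd.length ∧ hd[j]! = true := by
  rw [← window_any hd a m, List.any_eq_true]
  constructor
  · intro h
    exact ⟨true, h, rfl⟩
  · rintro ⟨x, hx, hxv⟩
    have : x = true := by simpa using hxv
    subst this
    exact hx

theorem count_window (hd : List Bool) (a b : Nat) (hab : a ≤ b) :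
    ((hd.take a).count true : Int) < ((hd.take b).count true : Int) ↔
      ((hd.drop a).take (b - a)).any (fun x => x) = true := by
  have hsplit : hd.take b = hd.take a ++ (hd.drop a).take (b - a) := by
    rw [← List.take_add (l := hd) (i := a) (j := b - a)]
    congr 1
    omega
  rw [hsplit, List.count_append]
  rw [List.any_eq_true]
  constructor
  · intro h
    have : 0 < ((hd.drop a).take (b - a)).count true := by omega
    rw [List.count_pos_iff] at this
    exact ⟨true, this, rfl⟩
  · rintro ⟨x, hx, hxv⟩
    have : x = true := by simpa using hxv
    subst this
    have : 0 < ((hd.drop a).take (b - a)).count true := List.count_pos_iff.mpr hx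
    omega

-- ===== VERDICT (by name: the statement is the Claim_ definition above) =====
theorem make_to_write_spec : Claim_unchanged_make_to_write := by
  intro hd buffer _ hD
  simp only [make_to_write, make_to_write_alt, pfx_spec]
  apply List.map_congr_left
  intro k hmem
  have hk : k < hd.length := List.mem_range.mp hmem
  have hget : PySem.List.pyGet? hd (k : Int) = some hd[k] := by
    rw [PySem.List.pyGet?_natCast]
    exact List.getElem?_eq_getElem hk
  rw [hget]
  simp only [Bool.if_false_right, Bool.decide_eq_true, Bool.and_true]
  set lo : Int := max 0 ((k : Int) - buffer) with hlo
  set hi : Int := min ((hd.length : Int)) ((k : Int) + buffer) with hhi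
  have hlo0 : (0 : Int) ≤ lo := le_max_left _ _
  by_cases hpos : 0 ≤ hi
  · -- non-negative stop: both compute over the window [lo.toNat, hi.toNat)
    rw [PySem.List.slice_toNat hd hlo0 hpos]
    by_cases hlt : lo < hi
    · have hloN : lo ≤ (hd.length : Int) := by omega
      have hiN : hi ≤ (hd.length : Int) := min_le_left _ _
      rw [pfx_get hd hi hpos hiN, pfx_get hd lo hlo0 hloN]
      have hcw := count_window hd lo.toNat hi.toNat (by omega)
      simp only [hlt, decide_true, Bool.true_and]
      congr 1
      rw [Bool.eq_iff_iff, decide_eq_true_iff]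
      exact hcw.symm.trans (by constructor <;> intro h <;> omega)
    · have hz : hi.toNat - lo.toNat = 0 := by omega
      simp [hlt, hz]
  · -- negative stop (only for buffer < 0): B's window is empty; A's wrapped slice has no
    -- detection by ¬D_
    have hlt : ¬ lo < hi := by omega
    have hkb : (k : Int) + buffer < 0 := by omega
    have hbuf : buffer < 0 := by omega
    by_cases hv : hd[k] = true
    · simp [hv, hlt]
    · have ha : PySem.List.clampIdx hd.length lo = min lo.toNat hd.length := by
        simp [PySem.List.clampIdx, not_lt.mpr hlo0]
      have hb : PySem.List.clampIdx hd.length hi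
          = if (hd.length : Int) + hi < 0 then 0 else ((hd.length : Int) + hi).toNat := by
        simp [PySem.List.clampIdx, show hi < 0 by omega]
      have hany : (PySem.List.slice hd (some lo) (some hi)).any (fun b => b) = false := by
        by_contra hcon
        rw [Bool.not_eq_false, PySem.List.slice, window_any] at hcon
        obtain ⟨j, hja, hjb, hjn, hjt⟩ := hcon
        rw [ha] at hja hjb
        rw [hb] at hjb
        apply hD
        refine ⟨hbuf, k, by omega, by rw [getElem!_pos hd k hk]; simpa using hv, ?_⟩
        rw [mem_window]
        refine ⟨j, ?_, ?_, hjn, hjt⟩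
        · simp only [hlo] at hja hjb ⊢
          split at hjb <;> omega
        · simp only [hhi] at hja hjb ⊢
          split at hjb <;> omega
      simp [hv, hlt, hany]

theorem make_to_write_changed : Claim_changed_make_to_write := by
  unfold Claim_changed_make_to_write; decide

theorem make_to_write_tight : Claim_exact_make_to_write := by
  intro hd buffer _ hD heq
  obtain ⟨hbuf, i, hilt, hif, hmem⟩ := hD
  rw [Bool.not_eq_eq_eq_not, Bool.not_true] at hif
  rw [mem_window] at hmem
  obtain ⟨j, hja, hjb, hjn, hjt⟩ := hmem
  have hin : i < hd.length := by omega
  have hib : (i : Int) + buffer < 0 := by omega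
  have hj1 : (i : Int) - buffer ≤ (j : Int) := by omega
  have hj2 : (j : Int) < (hd.length : Int) + i + buffer := by omega
  have hif' : hd[i] = false := by rwa [getElem!_pos hd i hin] at hif
  have hget : PySem.List.pyGet? hd (i : Int) = some hd[i] := by
    rw [PySem.List.pyGet?_natCast]; exact List.getElem?_eq_getElem hin
  set lo : Int := max 0 ((i : Int) - buffer) with hlo
  set hi : Int := min ((hd.length : Int)) ((i : Int) + buffer) with hhi
  have hlo0 : (0 : Int) ≤ lo := le_max_left _ _
  have hineg : hi < 0 := by omega
  have ha : PySem.List.clampIdx hd.length lo = min lo.toNat hd.length := by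
    simp [PySem.List.clampIdx, not_lt.mpr hlo0]
  have hb : PySem.List.clampIdx hd.length hi = ((hd.length : Int) + hi).toNat := by
    simp [PySem.List.clampIdx, hineg, show ¬ ((hd.length : Int) + hi < 0) by omega]
  have hanyt : (PySem.List.slice hd (some lo) (some hi)).any (fun b => b) = true := by
    rw [PySem.List.slice, window_any]
    rw [ha, hb]
    exact ⟨j, by omega, by omega, hjn, hjt⟩
  have hA : (make_to_write hd buffer)[i]? = some true := by
    rw [make_to_write, List.getElem?_map, List.getElem?_range hin]
    simp only [Option.map_some, Option.some.injEq]
    rw [List.any_eq_true] at hanyt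
    obtain ⟨x, hx, hxv⟩ := hanyt
    have hxt : x = true := by simpa using hxv
    subst hxt
    simp [hget, hif']
    exact hx
  have hB : (make_to_write_alt hd buffer)[i]? = some false := by
    rw [make_to_write_alt]
    simp only [List.getElem?_map, List.getElem?_range hin, Option.map_some]
    simp [hget, hif', show ¬ lo < hi by omega]
    intro _ _ h3 _
    exact absurd h3 (by omega)
  rw [heq, hB] at hA
  simp at hA
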